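-- pv_equiv track=rewrite | github.com/seftiz/V2X-ATE | tests/gm/lan/hdlc.py | hdlc_encode
-- ===== SOURCE A (Python) =====
-- HDLC_SOH = 0xC0
--
-- HDLC_EOT = 0xFE
--
-- HDLC_DLE = 0x7D
--
-- HDLC_XOR_VAL = 0x20
--
-- hdlc_special_char_list = [HDLC_SOH, HDLC_EOT, HDLC_DLE]
--
-- def hdlc_encode(buffer):
--     cs = _hdlc_calc_cs(buffer)
--     new_buf = chr(HDLC_SOH)
--     for ch in buffer:
--         och = ord(ch)
--         if och in hdlc_special_char_list:
--             new_buf += chr(HDLC_DLE)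
--             new_buf += chr(och ^ HDLC_XOR_VAL)
--         else:
--             new_buf += chr(och)
--     new_buf += chr(cs)
--     new_buf += chr(HDLC_EOT)
--     return new_buf
--
-- def _hdlc_calc_cs(buffer):
--     cs = 0
--     for ch in buffer:
--         cs += ord(ch) ^ 0xAA
--         cs &= 0xFF # cs is a one byte variable
--     cs = 0xFF - (cs ^ 0xAA)
--     return cs
-- ===== SOURCE B (Python) =====
-- HDLC_SOH = 0xC0
-- HDLC_EOT = 0xFE
-- HDLC_DLE = 0x7D
-- HDLC_XOR_VAL = 0x20
--
-- def hdlc_encode(buffer):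
--     # single pass: fold checksum and emit escaped chars in the same loop
--     parts = [chr(HDLC_SOH)]
--     cs = 0
--     for ch in buffer:
--         och = ord(ch)
--         cs = (cs + (och ^ 0xAA)) & 0xFF
--         if och in (HDLC_SOH, HDLC_EOT, HDLC_DLE):
--             parts.append(chr(HDLC_DLE))
--             parts.append(chr(och ^ HDLC_XOR_VAL))
--         else:
--             parts.append(chr(och))
--     cs = 0xFF - (cs ^ 0xAA)
--     parts.append(chr(cs))
--     parts.append(chr(HDLC_EOT))
--     return ''.join(parts)
-- ===== Notes on version B (the rewrite author's own statement) =====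
-- stated objective: alternative
-- what changed: B fuses A's two passes (separate checksum helper then encode loop) into one loop that folds the checksum and emits escaped characters together, collecting output in a list joined once instead of repeated string concatenation.
import Mathlib
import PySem

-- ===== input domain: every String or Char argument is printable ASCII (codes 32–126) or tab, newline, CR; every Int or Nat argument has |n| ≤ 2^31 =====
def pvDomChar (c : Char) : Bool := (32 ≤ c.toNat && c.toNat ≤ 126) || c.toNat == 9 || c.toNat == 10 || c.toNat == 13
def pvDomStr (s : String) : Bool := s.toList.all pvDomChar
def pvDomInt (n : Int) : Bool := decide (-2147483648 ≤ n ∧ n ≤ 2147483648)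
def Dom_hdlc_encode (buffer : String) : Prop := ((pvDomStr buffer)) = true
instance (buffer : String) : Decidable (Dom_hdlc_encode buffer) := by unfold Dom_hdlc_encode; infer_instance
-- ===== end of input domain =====

-- B fuses A's two passes (checksum helper, then encode loop) into one loop; return values proved equal.

-- ===== PORT A =====
-- helper _hdlc_calc_cs: cs accumulated with & 0xFF each step, then finalized
def pvCalcCs (buffer : String) : Nat :=
  let cs := buffer.toList.foldl (fun cs ch => (cs + (ch.toNat ^^^ 0xAA)) &&& 0xFF) 0
  0xFF - (cs ^^^ 0xAA)

def hdlc_encode (buffer : String) : String :=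
  let cs := pvCalcCs buffer
  let newBuf := buffer.toList.foldl (fun nb ch =>
    let och := ch.toNat
    if och ∈ [0xC0, 0xFE, 0x7D] then
      nb ++ [Char.ofNat 0x7D, Char.ofNat (och ^^^ 0x20)]
    else
      nb ++ [Char.ofNat och]) [Char.ofNat 0xC0]
  String.mk (newBuf ++ [Char.ofNat cs, Char.ofNat 0xFE])

-- ===== PORT B =====
-- single pass carrying (output chunks, running checksum); joined at the end
def pvFuseStep (p : List Char × Nat) (ch : Char) : List Char × Nat :=
  let och := ch.toNat
  let cs := (p.2 + (och ^^^ 0xAA)) &&& 0xFF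
  if och = 0xC0 ∨ och = 0xFE ∨ och = 0x7D then
    (p.1 ++ [Char.ofNat 0x7D, Char.ofNat (och ^^^ 0x20)], cs)
  else
    (p.1 ++ [Char.ofNat och], cs)

def hdlc_encode_alt (buffer : String) : String :=
  let st := buffer.toList.foldl pvFuseStep ([Char.ofNat 0xC0], 0)
  let cs := 0xFF - (st.2 ^^^ 0xAA)
  String.mk (st.1 ++ [Char.ofNat cs, Char.ofNat 0xFE])

-- ===== PRECONDITION & SPEC =====
def Spec_hdlc_encode (buffer : String) (out : String) : Prop := out = hdlc_encode_alt buffer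
instance (buffer : String) (out : String) : Decidable (Spec_hdlc_encode buffer out) := by unfold Spec_hdlc_encode; infer_instance

-- ===== CLAIM (what is proved, stated in full; the proofs are below) =====
def Claim_equal_hdlc_encode : Prop := ∀ (buffer : String), Dom_hdlc_encode buffer → Spec_hdlc_encode buffer (hdlc_encode buffer)

-- ===== LEMMAS AND PROOFS =====
-- the fused fold computes the pair of A's two folds
theorem pvFuse_eq (l : List Char) (acc : List Char) (cs : Nat) :
    l.foldl pvFuseStep (acc, cs) =
      (l.foldl (fun nb ch =>
          let och := ch.toNat
          if och = 0xC0 ∨ och = 0xFE ∨ och = 0x7D then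
            nb ++ [Char.ofNat 0x7D, Char.ofNat (och ^^^ 0x20)]
          else
            nb ++ [Char.ofNat och]) acc,
       l.foldl (fun cs ch => (cs + (ch.toNat ^^^ 0xAA)) &&& 0xFF) cs) := by
  induction l generalizing acc cs with
  | nil => rfl
  | cons c t ih =>
    simp only [List.foldl_cons, pvFuseStep]
    split_ifs <;> exact ih _ _

-- ===== VERDICT (by name: the statement is the Claim_ definition above) =====
theorem hdlc_encode_spec : Claim_equal_hdlc_encode := by
  intro buffer _
  unfold Spec_hdlc_encode hdlc_encode hdlc_encode_alt pvCalcCs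
  simp only [List.mem_cons, List.not_mem_nil, or_false]
  rw [pvFuse_eq]
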